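-- pv_equiv track=rewrite | github.com/santoshkumarm29/gt-dags | dags/ww_app_data_import_driver.py | evenly_distribute
-- ===== SOURCE A (Python) =====
-- def evenly_distribute(tab_list, no_of_buckets):
--     """Distribute items in tab_list (tuples of (val, weight)) into no_of_buckets buckets"""
--     buckets = [[] for i in range(no_of_buckets)]
--     weights = [[0, i] for i in range(no_of_buckets)]
--     for item in sorted(tab_list, key=lambda x: x[1], reverse=True):
--         idx = weights[0][1]
--         buckets[idx].append(item)
--         weights[0][0] += item[1]
--         weights = sorted(weights)
--     return buckets
-- ===== SOURCE B (Python) =====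
-- def evenly_distribute(tab_list, no_of_buckets):
--     """Distribute items in tab_list (tuples of (val, weight)) into no_of_buckets buckets"""
--     totals = [0] * no_of_buckets
--     assignment = []
--     for item in sorted(tab_list, key=lambda x: x[1], reverse=True):
--         best = 0
--         for i in range(1, no_of_buckets):
--             if totals[i] < totals[best]:
--                 best = i
--         assignment.append((best, item))
--         totals[best] += item[1]
--     return [[item for (b, item) in assignment if b == j] for j in range(no_of_buckets)]
-- ===== Notes on version B (the rewrite author's own statement) =====
-- stated objective: alternative
-- what changed: B replaces A's mutable (weight,index) pair list that is fully re-sorted after every item and its in-loop bucket mutation by two staged passes: a fold that keeps only a running-totals array (target picked by an explicit first-argmin scan) and records (bucket,item) assignments, then a final grouping pass that builds each bucket by filtering the assignment list.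
import Mathlib
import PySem

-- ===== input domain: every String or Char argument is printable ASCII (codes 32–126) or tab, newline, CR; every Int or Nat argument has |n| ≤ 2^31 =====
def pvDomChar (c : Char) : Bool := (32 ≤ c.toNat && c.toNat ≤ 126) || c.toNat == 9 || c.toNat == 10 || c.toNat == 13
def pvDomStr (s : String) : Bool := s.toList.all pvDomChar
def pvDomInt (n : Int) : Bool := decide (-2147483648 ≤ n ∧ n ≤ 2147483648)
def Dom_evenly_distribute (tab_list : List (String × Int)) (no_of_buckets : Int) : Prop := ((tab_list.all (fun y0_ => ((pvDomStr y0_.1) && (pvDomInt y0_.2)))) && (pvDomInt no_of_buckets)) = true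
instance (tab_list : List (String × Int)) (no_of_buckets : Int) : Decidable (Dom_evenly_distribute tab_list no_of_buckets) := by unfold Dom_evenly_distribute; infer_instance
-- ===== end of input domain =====

-- B replaces A's per-item re-sort of a (weight,index) pair list and in-loop bucket mutation by
-- two staged passes: a fold keeping only a running-totals array (first-argmin scan) that records
-- (bucket, item) assignments, then a final grouping pass building each bucket by filtering
-- (objective: alternative).

-- ===== PORT A =====
def evenly_distribute (tab_list : List (String × Int)) (no_of_buckets : Int) : List (List (String × Int)) :=
  let buckets : List (List (String × Int)) :=
    (PySem.List.pyRange 0 no_of_buckets 1).map (fun _ => [])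
  let weights : List (Int × Int) :=
    (PySem.List.pyRange 0 no_of_buckets 1).map (fun i => ((0 : Int), i))
  let st := (PySem.List.sorted tab_list (fun x => x.2) true).foldl
    (fun (s : List (List (String × Int)) × List (Int × Int)) item =>
      let idx : Int := (PySem.List.pyGetD s.2 0 (0, 0)).2
      let buckets' := PySem.List.pySetD s.1 idx (PySem.List.pyGetD s.1 idx [] ++ [item])
      let weights' := PySem.List.pySetD s.2 0 ((PySem.List.pyGetD s.2 0 (0, 0)).1 + item.2, idx)
      (buckets', PySem.List.sorted2 weights' (fun w => w.1) (fun w => w.2)))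
    (buckets, weights)
  st.1

-- ===== PORT B =====
def evenly_distribute_alt (tab_list : List (String × Int)) (no_of_buckets : Int) : List (List (String × Int)) :=
  let totals : List Int := PySem.List.pyRepeat [0] no_of_buckets
  let st := (PySem.List.sorted tab_list (fun x => x.2) true).foldl
    (fun (s : List Int × List (Int × (String × Int))) item =>
      let best : Int := (PySem.List.pyRange 1 no_of_buckets 1).foldl
        (fun b i => if PySem.List.pyGetD s.1 i 0 < PySem.List.pyGetD s.1 b 0 then i else b) 0
      (PySem.List.pySetD s.1 best (PySem.List.pyGetD s.1 best 0 + item.2),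
       s.2 ++ [(best, item)]))
    (totals, [])
  (PySem.List.pyRange 0 no_of_buckets 1).map
    (fun j => (st.2.filter (fun p => p.1 == j)).map (fun p => p.2))

-- ===== PRECONDITION & SPEC =====
-- Pre_ excludes exactly the inputs on which A raises: a nonempty tab_list with
-- no_of_buckets ≤ 0 makes weights[0] an IndexError (B raises IndexError on totals[0] there).
def Pre_evenly_distribute (tab_list : List (String × Int)) (no_of_buckets : Int) : Prop :=
  tab_list = [] ∨ 0 < no_of_buckets
instance (tab_list : List (String × Int)) (no_of_buckets : Int) : Decidable (Pre_evenly_distribute tab_list no_of_buckets) := by unfold Pre_evenly_distribute; infer_instance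
def pvWitness_evenly_distribute : (List (String × Int)) × Int := ([("a", 3), ("bb", 1), ("c", 2)], 2)
def Spec_evenly_distribute (tab_list : List (String × Int)) (no_of_buckets : Int) (out : List (List (String × Int))) : Prop := out = evenly_distribute_alt tab_list no_of_buckets
instance (tab_list : List (String × Int)) (no_of_buckets : Int) (out : List (List (String × Int))) : Decidable (Spec_evenly_distribute tab_list no_of_buckets out) := by unfold Spec_evenly_distribute; infer_instance

-- ===== CLAIM (what is proved, stated in full; the proofs are below) =====
def Claim_equal_evenly_distribute : Prop := ∀ (tab_list : List (String × Int)) (no_of_buckets : Int), Dom_evenly_distribute tab_list no_of_buckets → Pre_evenly_distribute tab_list no_of_buckets → Spec_evenly_distribute tab_list no_of_buckets (evenly_distribute tab_list no_of_buckets)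

-- ===== LEMMAS AND PROOFS =====

-- the loop bodies of the two ports, named for the induction
def pvStepA (s : List (List (String × Int)) × List (Int × Int)) (item : String × Int) :
    List (List (String × Int)) × List (Int × Int) :=
  let idx : Int := (PySem.List.pyGetD s.2 0 (0, 0)).2
  let buckets' := PySem.List.pySetD s.1 idx (PySem.List.pyGetD s.1 idx [] ++ [item])
  let weights' := PySem.List.pySetD s.2 0 ((PySem.List.pyGetD s.2 0 (0, 0)).1 + item.2, idx)
  (buckets', PySem.List.sorted2 weights' (fun w => w.1) (fun w => w.2))

def pvStepB (k : Int) (s : List Int × List (Int × (String × Int))) (item : String × Int) :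
    List Int × List (Int × (String × Int)) :=
  let best : Int := (PySem.List.pyRange 1 k 1).foldl
    (fun b i => if PySem.List.pyGetD s.1 i 0 < PySem.List.pyGetD s.1 b 0 then i else b) 0
  (PySem.List.pySetD s.1 best (PySem.List.pyGetD s.1 best 0 + item.2),
   s.2 ++ [(best, item)])

-- B's final grouping pass, as a function of the assignment list
def pvGroup (k : Int) (asg : List (Int × (String × Int))) : List (List (String × Int)) :=
  (PySem.List.pyRange 0 k 1).map (fun j => (asg.filter (fun p => p.1 == j)).map (fun p => p.2))

theorem evenly_distribute_eq_fold (tab_list : List (String × Int)) (k : Int) :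
    evenly_distribute tab_list k =
      ((PySem.List.sorted tab_list (fun x => x.2) true).foldl pvStepA
        ((PySem.List.pyRange 0 k 1).map (fun _ => []),
         (PySem.List.pyRange 0 k 1).map (fun i => ((0 : Int), i)))).1 := rfl

theorem evenly_distribute_alt_eq_fold (tab_list : List (String × Int)) (k : Int) :
    evenly_distribute_alt tab_list k =
      pvGroup k (((PySem.List.sorted tab_list (fun x => x.2) true).foldl (pvStepB k)
        (PySem.List.pyRepeat [0] k, [])).2) := rfl

-- (value, index) pairs of a totals list, starting at index s
def pvPairs : List Int → Int → List (Int × Int)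
  | [], _ => []
  | x :: t, i => (x, i) :: pvPairs t (i + 1)

-- weak lexicographic order on (total, index)
def pvLexLe (p q : Int × Int) : Prop := p.1 < q.1 ∨ (p.1 = q.1 ∧ p.2 ≤ q.2)

theorem pvLexLe_refl (p : Int × Int) : pvLexLe p p := by unfold pvLexLe; omega

theorem pvLexLe_trans {a b c : Int × Int} (h1 : pvLexLe a b) (h2 : pvLexLe b c) : pvLexLe a c := by
  unfold pvLexLe at *; omega

theorem pvPairs_length (t : List Int) (s : Int) : (pvPairs t s).length = t.length := by
  induction t generalizing s with
  | nil => rfl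
  | cons x r ih => simp [pvPairs, ih]

theorem pvPairs_getElem? (t : List Int) (s : Int) (j : Nat) :
    (pvPairs t s)[j]? = (t[j]?).map (fun x => (x, s + (j : Int))) := by
  induction t generalizing s j with
  | nil => simp [pvPairs]
  | cons x r ih =>
    cases j with
    | zero => simp [pvPairs]
    | succ j =>
      simp only [pvPairs, List.getElem?_cons_succ, ih]
      cases r[j]? with
      | none => rfl
      | some y => simp; ring_nf

theorem mem_pvPairs {p : Int × Int} {t : List Int} {s : Int} :
    p ∈ pvPairs t s ↔ ∃ j : Nat, t[j]? = some p.1 ∧ p.2 = s + (j : Int) := by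
  obtain ⟨p1, p2⟩ := p
  rw [List.mem_iff_getElem?]
  constructor
  · rintro ⟨j, hj⟩
    rw [pvPairs_getElem?] at hj
    rcases Option.map_eq_some_iff.mp hj with ⟨x, hx, hpx⟩
    simp only [Prod.mk.injEq] at hpx
    obtain ⟨rfl, rfl⟩ := hpx
    exact ⟨j, hx, rfl⟩
  · rintro ⟨j, hj, rfl⟩
    refine ⟨j, ?_⟩
    rw [pvPairs_getElem?, hj]
    rfl

theorem pvPairs_set (t : List Int) (s : Int) (j : Nat) (v : Int) :
    pvPairs (t.set j v) s = (pvPairs t s).set j (v, s + (j : Int)) := by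
  induction t generalizing s j with
  | nil => simp [pvPairs]
  | cons x r ih =>
    cases j with
    | zero => simp [pvPairs]
    | succ j =>
      simp only [List.set_cons_succ, pvPairs, ih]
      congr 3
      push_cast; ring

-- the Boolean "a < b" test sorted2 uses (lexicographic on (fst, snd))
def pvBefore (a b : Int × Int) : Bool :=
  decide (a.1 < b.1) || (!decide (b.1 < a.1) && decide (a.2 < b.2))

theorem pvBefore_true {a b : Int × Int} (h : pvBefore a b = true) : pvLexLe a b := by
  unfold pvBefore at h; unfold pvLexLe
  simp only [Bool.or_eq_true, Bool.and_eq_true, Bool.not_eq_true', decide_eq_false_iff_not,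
    decide_eq_true_eq] at h
  omega

theorem pvBefore_false {a b : Int × Int} (h : pvBefore a b = false) : pvLexLe b a := by
  unfold pvBefore at h; unfold pvLexLe
  simp only [Bool.or_eq_false_iff, Bool.and_eq_false_iff, Bool.not_eq_false',
    decide_eq_false_iff_not, decide_eq_true_eq] at h
  omega

theorem sorted2_eq_foldl (xs : List (Int × Int)) :
    PySem.List.sorted2 xs (fun w => w.1) (fun w => w.2) =
      xs.foldl (fun acc x => PySem.List.insertBy pvBefore x acc) [] := rfl

theorem insertBy_pairwise (x : Int × Int) (acc : List (Int × Int))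
    (h : acc.Pairwise pvLexLe) :
    (PySem.List.insertBy pvBefore x acc).Pairwise pvLexLe := by
  induction acc with
  | nil => simp [PySem.List.insertBy]
  | cons y ys ih =>
    rcases List.pairwise_cons.mp h with ⟨hy, hys⟩
    simp only [PySem.List.insertBy]
    by_cases hb : pvBefore x y = true
    · simp only [hb, if_true]
      refine List.pairwise_cons.mpr ⟨?_, h⟩
      intro z hz
      rcases List.mem_cons.mp hz with rfl | hz
      · exact pvBefore_true hb
      · exact pvLexLe_trans (pvBefore_true hb) (hy z hz)
    · simp only [hb]
      refine List.pairwise_cons.mpr ⟨?_, ih hys⟩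
      intro z hz
      rcases (PySem.List.mem_insertBy pvBefore x z ys).mp hz with rfl | hzys
      · exact pvBefore_false (Bool.eq_false_iff.mpr hb)
      · exact hy z hzys

theorem foldl_insertBy_pairwise (xs : List (Int × Int)) (acc : List (Int × Int))
    (h : acc.Pairwise pvLexLe) :
    (xs.foldl (fun acc x => PySem.List.insertBy pvBefore x acc) acc).Pairwise pvLexLe := by
  induction xs generalizing acc with
  | nil => exact h
  | cons x r ih => exact ih _ (insertBy_pairwise x acc h)

theorem sorted2_pairwise_lexLe (xs : List (Int × Int)) :
    (PySem.List.sorted2 xs (fun w => w.1) (fun w => w.2)).Pairwise pvLexLe := by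
  rw [sorted2_eq_foldl]
  exact foldl_insertBy_pairwise xs [] (by simp)

-- replace the element at a known position through a permutation with a distinguished head
theorem perm_cons_set {α : Type} {l rest : List α} {m m' : α} {j : Nat}
    (hj : j < l.length) (hm : l[j] = m) (hp : (m :: rest).Perm l) :
    (m' :: rest).Perm (l.set j m') := by
  have hdecomp : l = l.take j ++ m :: l.drop (j + 1) := by
    conv_lhs => rw [← List.take_append_drop j l]
    rw [← List.getElem_cons_drop hj, hm]
  have hset : l.set j m' = l.take j ++ m' :: l.drop (j + 1) := by
    rw [List.set_eq_take_append_cons_drop]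
    simp [hj]
  have h1 : (m :: rest).Perm (m :: (l.take j ++ l.drop (j + 1))) :=
    (hdecomp ▸ hp).trans List.perm_middle
  rw [hset]
  exact (h1.cons_inv.cons m').trans List.perm_middle.symm

-- B's inner scan computes the FIRST index of minimal total
theorem pvScan_spec (t : List Int) (k : Int) :
    ∀ (n a b : Nat), k.toNat - a = n → b < a → a ≤ k.toNat →
    (∀ i, i < a → t.getD b 0 ≤ t.getD i 0) → (∀ i, i < b → t.getD b 0 < t.getD i 0) →
    ∃ r : Nat, ((PySem.List.pyRange (a : Int) k 1).foldl
        (fun bb i => if PySem.List.pyGetD t i 0 < PySem.List.pyGetD t bb 0 then i else bb)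
        ((b : Int))) = (r : Int)
      ∧ r < k.toNat ∧ (∀ i, i < k.toNat → t.getD r 0 ≤ t.getD i 0)
      ∧ (∀ i, i < r → t.getD r 0 < t.getD i 0) := by
  intro n
  induction n with
  | zero =>
    intro a b hn hba hak hmin hfirst
    have ha : a = k.toNat := by omega
    have hk : (a : Int) = k := by
      have hk0 : 0 < k.toNat := by omega
      omega
    have hrange : PySem.List.pyRange (a : Int) k 1 = [] := by
      rw [PySem.List.pyRange_one]
      have : (k - (a : Int)).toNat = 0 := by omega
      simp [this]
    refine ⟨b, by rw [hrange]; rfl, by omega, ?_, hfirst⟩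
    intro i hi
    exact hmin i (by omega)
  | succ n ih =>
    intro a b hn hba hak hmin hfirst
    have hlt : (a : Int) < k := by omega
    rw [PySem.List.pyRange_one_cons hlt, List.foldl_cons]
    have hga : PySem.List.pyGetD t ((a : Nat) : Int) 0 = t.getD a 0 := by
      simp [PySem.List.pyGetD_natCast]
    have hgb : PySem.List.pyGetD t ((b : Nat) : Int) 0 = t.getD b 0 := by
      simp [PySem.List.pyGetD_natCast]
    have hsucc : ((a : Int) + 1) = ((a + 1 : Nat) : Int) := by push_cast; ring
    by_cases hc : t.getD a 0 < t.getD b 0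
    · rw [if_pos (by rw [hga, hgb]; exact hc), hsucc]
      exact ih (a + 1) a (by omega) (by omega) (by omega)
        (fun i hi => by
          rcases Nat.lt_succ_iff_lt_or_eq.mp hi with hi' | rfl
          · exact le_of_lt (lt_of_lt_of_le hc (hmin i hi'))
          · exact le_refl _)
        (fun i hi => lt_of_lt_of_le hc (hmin i hi))
    · rw [if_neg (by rw [hga, hgb]; exact hc), hsucc]
      exact ih (a + 1) b (by omega) (by omega) (by omega)
        (fun i hi => by
          rcases Nat.lt_succ_iff_lt_or_eq.mp hi with hi' | rfl
          · exact hmin i hi'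
          · omega)
        hfirst

theorem pvFirstMin_unique (t : List Int) (r s : Nat)
    (hr1 : ∀ i, i < t.length → t.getD r 0 ≤ t.getD i 0) (hr2 : ∀ i, i < r → t.getD r 0 < t.getD i 0)
    (hs0 : s < t.length)
    (hs1 : ∀ i, i < t.length → t.getD s 0 ≤ t.getD i 0) (hs2 : ∀ i, i < s → t.getD s 0 < t.getD i 0)
    (hr0 : r < t.length) : r = s := by
  rcases lt_trichotomy r s with h | h | h
  · exact absurd (hr1 s hs0) (not_le_of_gt (hs2 r h))
  · exact h
  · exact absurd (hs1 r hr0) (not_le_of_gt (hr2 s h))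

-- appending one assignment to the grouping = appending the item to that bucket
theorem pvGroup_snoc (k : Int) (asg : List (Int × (String × Int))) (j : Nat)
    (item : String × Int) (hj : (j : Int) < k) :
    pvGroup k (asg ++ [((j : Int), item)]) =
      PySem.List.pySetD (pvGroup k asg) ((j : Nat) : Int)
        (PySem.List.pyGetD (pvGroup k asg) ((j : Nat) : Int) [] ++ [item]) := by
  have hjk : j < k.toNat := by omega
  unfold pvGroup
  rw [PySem.List.pySetD_natCast, PySem.List.pyGetD_natCast]
  have hkc : k = ((k.toNat : Nat) : Int) := by omega
  have hget : ((PySem.List.pyRange 0 k 1).map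
      (fun j' => (asg.filter (fun p => p.1 == j')).map (fun p => p.2))).getD j [] =
      (asg.filter (fun p => p.1 == (j : Int))).map (fun p => p.2) := by
    rw [hkc, List.getD_eq_getElem?_getD,
      PySem.List.getElem?_map_pyRange_zero _ k.toNat j hjk]
    rfl
  rw [hget]
  apply List.ext_getElem
  · simp
  · intro p hp1 hp2
    have hpk : p < k.toNat := by
      simpa [PySem.List.length_pyRange_one] using hp1
    have hplt : p < ((PySem.List.pyRange 0 k 1)).length := by
      simpa [PySem.List.length_pyRange_one] using hpk
    have hrp : (PySem.List.pyRange 0 k 1)[p] = (p : Int) := by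
      rw [PySem.List.getElem_pyRange_one]; ring
    rw [List.getElem_set, List.getElem_map, List.getElem_map, hrp]
    rw [List.filter_append, List.map_append]
    by_cases hpj : j = p
    · subst hpj
      simp
    · rw [if_neg hpj]
      have : ((((j : Int)), item) :: ([] : List (Int × (String × Int)))).filter
          (fun q => q.1 == (p : Int)) = [] := by
        simp only [List.filter_cons]
        have : (((j : Int), item).1 == (p : Int)) = false := by
          apply decide_eq_false
          intro h
          have h' : (j : Int) = (p : Int) := h
          exact hpj (by exact_mod_cast h')
        rw [this]
        rfl
      rw [this]
      simp

-- THE LOOP INVARIANT: A's weights list stays a lex-sorted permutation of B's (total, index)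
-- pairs, and A's buckets are always the grouping of B's assignments so far
theorem loop_eq (k : Int) (items : List (String × Int)) :
    ∀ (b : List (List (String × Int))) (w : List (Int × Int)) (t : List Int)
      (asg : List (Int × (String × Int))),
      t ≠ [] → t.length = k.toNat → w.Perm (pvPairs t 0) → w.Pairwise pvLexLe →
      b = pvGroup k asg →
      (items.foldl pvStepA (b, w)).1 = pvGroup k ((items.foldl (pvStepB k) (t, asg)).2) := by
  induction items with
  | nil => intro b w t asg _ _ _ _ hb; exact hb
  | cons item rest ihrest =>
    intro b w t asg ht htlen hperm hsort hb
    have hwlen : w.length = t.length := by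
      simpa [pvPairs_length] using hperm.length_eq
    cases w with
    | nil =>
      exfalso
      exact ht (List.length_eq_zero_iff.mp (by simpa using hwlen.symm))
    | cons m wr =>
      have hkpos : 0 < k.toNat := by
        have : 0 < t.length := List.length_pos_iff.mpr ht
        omega
      -- m is an entry of B's (value, index) pairs
      have hmmem : m ∈ pvPairs t 0 := hperm.mem_iff.mp (by simp)
      obtain ⟨j, hj, hm2⟩ := mem_pvPairs.mp hmmem
      have hm2' : m.2 = (j : Int) := by simpa using hm2
      obtain ⟨hjlt, hjget⟩ := List.getElem?_eq_some_iff.mp hj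
      -- m is lex-minimal among the pairs
      have hminp : ∀ p ∈ pvPairs t 0, pvLexLe m p := by
        intro p hp
        rcases List.mem_cons.mp (hperm.symm.mem_iff.mp hp) with rfl | hpwr
        · exact pvLexLe_refl p
        · exact (List.pairwise_cons.mp hsort).1 p hpwr
      have hgj : t.getD j 0 = m.1 := by
        rw [List.getD_eq_getElem?_getD, hj]; rfl
      -- j is the first index of minimal total
      have hjmin : ∀ i, i < k.toNat → t.getD j 0 ≤ t.getD i 0 := by
        intro i hi
        have hilt : i < t.length := by omega
        have hmemp : ((t[i], (i : Int)) : Int × Int) ∈ pvPairs t 0 :=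
          mem_pvPairs.mpr ⟨i, by simp, by simp⟩
        have hle := hminp _ hmemp
        unfold pvLexLe at hle; dsimp at hle
        rw [hgj, List.getD_eq_getElem?_getD, List.getElem?_eq_getElem hilt]
        simp only [Option.getD_some]
        omega
      have hjfirst : ∀ i, i < j → t.getD j 0 < t.getD i 0 := by
        intro i hi
        have hilt : i < t.length := by omega
        have hmemp : ((t[i], (i : Int)) : Int × Int) ∈ pvPairs t 0 :=
          mem_pvPairs.mpr ⟨i, by simp, by simp⟩
        have hle := hminp _ hmemp
        unfold pvLexLe at hle; dsimp at hle
        rw [hgj, List.getD_eq_getElem?_getD, List.getElem?_eq_getElem hilt]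
        simp only [Option.getD_some]
        rw [hgj] at hjmin
        have := hjmin i (by omega)
        rw [List.getD_eq_getElem?_getD, List.getElem?_eq_getElem hilt] at this
        simp only [Option.getD_some] at this
        rw [hm2'] at hle
        omega
      -- hence B's inner scan lands on j
      have hscan : ((PySem.List.pyRange 1 k 1).foldl
          (fun bb i => if PySem.List.pyGetD t i 0 < PySem.List.pyGetD t bb 0 then i else bb)
          (0 : Int)) = ((j : Nat) : Int) := by
        obtain ⟨r, hr, hr0, hr1, hr2⟩ := pvScan_spec t k (k.toNat - 1) 1 0 rfl
          (by omega) (by omega)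
          (fun i hi => by interval_cases i; exact le_refl _)
          (fun i hi => by omega)
        push_cast at hr
        rw [hr]
        congr 1
        exact pvFirstMin_unique t r j
          (fun i hi => hr1 i (by omega)) hr2 hjlt
          (fun i hi => hjmin i (by omega)) hjfirst (by omega)
      -- B's step
      have hstepB : pvStepB k (t, asg) item =
          (t.set j (m.1 + item.2), asg ++ [((j : Int), item)]) := by
        unfold pvStepB
        simp only [hscan]
        rw [PySem.List.pySetD_natCast, PySem.List.pyGetD_natCast]
        simp only [hgj]
      -- A's step
      have hstepA : pvStepA (pvGroup k asg, m :: wr) item =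
          (PySem.List.pySetD (pvGroup k asg) ((j : Nat) : Int)
            (PySem.List.pyGetD (pvGroup k asg) ((j : Nat) : Int) [] ++ [item]),
           PySem.List.sorted2 ((m.1 + item.2, (j : Int)) :: wr) (fun w => w.1) (fun w => w.2)) := by
        show (PySem.List.pySetD (pvGroup k asg) (PySem.List.pyGetD (m :: wr) 0 (0, 0)).2
                (PySem.List.pyGetD (pvGroup k asg) (PySem.List.pyGetD (m :: wr) 0 (0, 0)).2 [] ++ [item]),
              PySem.List.sorted2
                (PySem.List.pySetD (m :: wr) 0
                  ((PySem.List.pyGetD (m :: wr) 0 (0, 0)).1 + item.2, (PySem.List.pyGetD (m :: wr) 0 (0, 0)).2))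
                (fun w => w.1) (fun w => w.2)) = _
        rw [PySem.List.pyGetD_zero_cons, hm2']
        have hset0 : PySem.List.pySetD (m :: wr) 0 ((m.1 + item.2), ((j : Nat) : Int)) =
            ((m.1 + item.2), ((j : Nat) : Int)) :: wr := by
          simpa using PySem.List.pySetD_natCast (m :: wr) 0 ((m.1 + item.2), ((j : Nat) : Int))
        rw [hset0]
      -- the new states still satisfy the invariant
      have hjlt' : j < (pvPairs t 0).length := by rw [pvPairs_length]; exact hjlt
      have hperm' : ((m.1 + item.2, (j : Int)) :: wr).Perm (pvPairs (t.set j (m.1 + item.2)) 0) := by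
        rw [pvPairs_set]
        simp only [zero_add]
        have hpj : (pvPairs t 0)[j]'hjlt' = m := by
          have hg : (pvPairs t 0)[j]? = some (m.1, 0 + (j : Int)) := by
            rw [pvPairs_getElem?, hj]; rfl
          obtain ⟨_, hg2⟩ := List.getElem?_eq_some_iff.mp hg
          rw [hg2]
          simp [Prod.ext_iff, hm2']
        exact perm_cons_set hjlt' hpj hperm
      rw [List.foldl_cons, List.foldl_cons, hb, hstepA, hstepB]
      rw [← pvGroup_snoc k asg j item (by omega)]
      apply ihrest
      · intro hnil
        have h0 : t.length = 0 := by simpa using congrArg List.length hnil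
        omega
      · simp [htlen]
      · exact (PySem.List.sorted2_perm ((m.1 + item.2, (j : Int)) :: wr)
          (fun w : Int × Int => w.1) (fun w => w.2) false).trans hperm'
      · exact sorted2_pairwise_lexLe _
      · rfl

theorem pvPairs_replicate (n : Nat) (s : Int) :
    pvPairs (List.replicate n 0) s = (List.range n).map (fun j : Nat => ((0 : Int), s + (j : Int))) := by
  induction n generalizing s with
  | zero => rfl
  | succ n ih =>
    rw [List.replicate_succ, List.range_succ_eq_map]
    show ((0 : Int), s) :: pvPairs (List.replicate n 0) (s + 1) = _
    rw [ih, List.map_cons, List.map_map]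
    congr 1
    · simp
    · apply List.map_congr_left
      intro j _
      simp [Function.comp, Prod.ext_iff]
      ring

-- ===== VERDICT (by name: the statement is the Claim_ definition above) =====
theorem evenly_distribute_spec : Claim_equal_evenly_distribute := by
  intro tl k _hdom hpre
  unfold Spec_evenly_distribute
  rcases hpre with rfl | hk
  · rfl
  · rw [evenly_distribute_eq_fold, evenly_distribute_alt_eq_fold]
    have hw0 : (PySem.List.pyRange 0 k 1).map (fun i => ((0 : Int), i)) =
        pvPairs (PySem.List.pyRepeat [0] k) 0 := by
      rw [PySem.List.pyRepeat_singleton, pvPairs_replicate, PySem.List.pyRange_one]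
      rw [List.map_map]
      rw [show ((k : Int) - 0).toNat = k.toNat by omega]
      apply List.map_congr_left
      intro j _
      simp
    apply loop_eq
    · rw [PySem.List.pyRepeat_singleton]
      simp
      omega
    · rw [PySem.List.pyRepeat_singleton]
      simp
    · rw [hw0]
    · rw [hw0, PySem.List.pyRepeat_singleton, pvPairs_replicate]
      rw [List.pairwise_map]
      refine List.pairwise_lt_range.imp ?_
      intro i j hij
      unfold pvLexLe
      simp
      omega
    · unfold pvGroup
      apply List.map_congr_left
      intro j _
      rfl
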